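-- pv_equiv track=rewrite | github.com/aditya-ramabadran/formal-islands | src/formal_islands/extraction/pipeline.py | _extract_display_math_blocks
-- ===== SOURCE A (Python) =====
-- def _extract_display_math_blocks(text: str) -> list[str]:
--     blocks: list[str] = []
--     start = 0
--     while True:
--         open_index = text.find("\\[", start)
--         if open_index == -1:
--             return blocks
--         close_index = text.find("\\]", open_index + 2)
--         if close_index == -1:
--             return blocks
--         blocks.append(text[open_index + 2 : close_index])
--         start = close_index + 2
-- ===== SOURCE B (Python) =====
-- def _extract_display_math_blocks(text: str) -> list[str]:
--     """Single left-to-right state-machine pass: outside/inside a block, no find/slice calls."""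
--     blocks: list[str] = []
--     acc = None  # None = outside a block; list of chars = inside a block
--     i = 0
--     n = len(text)
--     while i < n:
--         if acc is None:
--             if text.startswith("\\[", i):
--                 acc = []
--                 i += 2
--             else:
--                 i += 1
--         else:
--             if text.startswith("\\]", i):
--                 blocks.append("".join(acc))
--                 acc = None
--                 i += 2
--             else:
--                 acc.append(text[i])
--                 i += 1
--     return blocks
-- ===== Notes on version B (the rewrite author's own statement) =====
-- stated objective: alternative
-- what changed: Replaces A's loop of repeated str.find calls for the open/close markers plus slicing with a single left-to-right character state machine (outside/inside a block) that accumulates block characters and emits a block when it sees the close marker.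
import Mathlib
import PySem

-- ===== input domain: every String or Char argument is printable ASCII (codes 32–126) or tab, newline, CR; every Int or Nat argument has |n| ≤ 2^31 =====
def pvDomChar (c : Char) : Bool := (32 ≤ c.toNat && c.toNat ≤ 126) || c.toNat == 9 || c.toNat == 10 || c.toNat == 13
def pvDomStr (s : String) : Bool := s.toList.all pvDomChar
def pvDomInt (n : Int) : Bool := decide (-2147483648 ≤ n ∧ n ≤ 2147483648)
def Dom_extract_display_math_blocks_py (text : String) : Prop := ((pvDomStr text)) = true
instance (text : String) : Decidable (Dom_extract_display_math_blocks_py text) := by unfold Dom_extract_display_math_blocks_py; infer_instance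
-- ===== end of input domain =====

-- B replaces A's find/find/slice loop with a single character-by-character state machine; objective: alternative (same O(n) cost).

-- ===== PORT A =====
-- A's `while True` loop; fuel is only a termination guard (one unit per iteration;
-- `text.length + 1` always suffices since `start` strictly grows, see pvFindLoop_eq below).
def pvFindLoop (text : String) (fuel : Nat) (blocks : List String) (start : Int) : List String :=
  match fuel with
  | 0 => blocks
  | fuel' + 1 =>
    let open_index := PySem.Str.findFrom text "\\[" start none
    if open_index = -1 then blocks
    else
      let close_index := PySem.Str.findFrom text "\\]" (open_index + 2) none
      if close_index = -1 then blocks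
      else
        pvFindLoop text fuel'
          (blocks ++ [PySem.Str.slice text (some (open_index + 2)) (some close_index)])
          (close_index + 2)

def extract_display_math_blocks_py (text : String) : List String :=
  pvFindLoop text (text.toList.length + 1) [] 0

-- ===== PORT B =====
-- Source B's single pass; the state is `none` (outside a block) or `some acc` (inside, chars so far).
def pvScan (cs : List Char) (st : Option (List Char)) : List String :=
  match cs, st with
  | [], _ => []
  | c :: rest, none =>
    if c = '\\' ∧ rest.head? = some '[' then pvScan rest.tail (some [])
    else pvScan rest none
  | c :: rest, some acc =>
    if c = '\\' ∧ rest.head? = some ']' then String.ofList acc :: pvScan rest.tail none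
    else pvScan rest (some (acc ++ [c]))
termination_by cs.length
decreasing_by
  all_goals simp [List.length_tail]
  all_goals omega

def extract_display_math_blocks_py_alt (text : String) : List String :=
  pvScan text.toList none

-- ===== PRECONDITION & SPEC =====
def Spec_extract_display_math_blocks_py (text : String) (out : List String) : Prop := out = extract_display_math_blocks_py_alt text
instance (text : String) (out : List String) : Decidable (Spec_extract_display_math_blocks_py text out) := by unfold Spec_extract_display_math_blocks_py; infer_instance

-- ===== CLAIM (what is proved, stated in full; the proofs are below) =====
def Claim_equal_extract_display_math_blocks_py : Prop := ∀ (text : String), Dom_extract_display_math_blocks_py text → Spec_extract_display_math_blocks_py text (extract_display_math_blocks_py text)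

-- ===== LEMMAS AND PROOFS =====

-- the two-char marker test of B's scanner, as a prefix statement
lemma pv_prefix_pair_iff (a b c : Char) (rest : List Char) :
    [a, b] <+: c :: rest ↔ c = a ∧ rest.head? = some b := by
  constructor
  · rintro ⟨r, hr⟩
    cases rest with
    | nil => simp at hr
    | cons d rest' =>
      injection hr with h1 h2; injection h2 with h3 _
      exact ⟨h1.symm, by simp [h3.symm]⟩
  · rintro ⟨rfl, hh⟩
    cases rest with
    | nil => simp at hh
    | cons d rest' =>
      simp at hh; subst hh
      exact ⟨rest', rfl⟩

lemma pv_no_infix_no_drop (sub t : List Char) (h : ¬ sub <:+: t) : ∀ i, ¬ sub <+: t.drop i := by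
  intro i hi
  exact h ((PySem.Chars.isIn_iff_infix sub t).mp
    ((PySem.Chars.exists_prefix_drop_iff_isIn sub t).mp ⟨i, hi⟩))

lemma pvScan_none_nomatch (t : List Char) (h : ∀ i, ¬ ['\\', '['] <+: t.drop i) :
    pvScan t none = [] := by
  induction t with
  | nil => simp [pvScan]
  | cons c rest ih =>
    have h0 : ¬ (c = '\\' ∧ rest.head? = some '[') := fun hc =>
      h 0 (by simpa using (pv_prefix_pair_iff '\\' '[' c rest).mpr hc)
    rw [pvScan, if_neg h0]
    exact ih (fun i => by simpa using h (i + 1))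

lemma pvScan_none_open (t : List Char) (o : Nat)
    (h1 : ['\\', '['] <+: t.drop o) (h2 : ∀ i < o, ¬ ['\\', '['] <+: t.drop i) :
    pvScan t none = pvScan (t.drop (o + 2)) (some []) := by
  induction t generalizing o with
  | nil => simp at h1
  | cons c rest ih =>
    cases o with
    | zero =>
      rw [List.drop_zero] at h1
      obtain ⟨rfl, hh⟩ := (pv_prefix_pair_iff '\\' '[' c rest).mp h1
      cases rest with
      | nil => simp at hh
      | cons d rest' =>
        simp at hh; subst hh
        rw [pvScan, if_pos ⟨rfl, rfl⟩]
        rfl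
    | succ o' =>
      have h0 : ¬ (c = '\\' ∧ rest.head? = some '[') := fun hc =>
        h2 0 (by omega) (by simpa using (pv_prefix_pair_iff '\\' '[' c rest).mpr hc)
      rw [pvScan, if_neg h0]
      have := ih o' (by simpa using h1) (fun i hi => by simpa using h2 (i + 1) (by omega))
      rw [this]
      simp [List.drop_succ_cons]

lemma pvScan_some_noclose (u : List Char) (acc : List Char)
    (h : ∀ i, ¬ ['\\', ']'] <+: u.drop i) : pvScan u (some acc) = [] := by
  induction u generalizing acc with
  | nil => simp [pvScan]
  | cons c rest ih =>
    have h0 : ¬ (c = '\\' ∧ rest.head? = some ']') := fun hc =>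
      h 0 (by simpa using (pv_prefix_pair_iff '\\' ']' c rest).mpr hc)
    rw [pvScan, if_neg h0]
    exact ih _ (fun i => by simpa using h (i + 1))

lemma pvScan_some_close (u : List Char) (g : Nat) (acc : List Char)
    (h1 : ['\\', ']'] <+: u.drop g) (h2 : ∀ i < g, ¬ ['\\', ']'] <+: u.drop i) :
    pvScan u (some acc) = String.ofList (acc ++ u.take g) :: pvScan (u.drop (g + 2)) none := by
  induction u generalizing g acc with
  | nil => simp at h1
  | cons c rest ih =>
    cases g with
    | zero =>
      rw [List.drop_zero] at h1
      obtain ⟨rfl, hh⟩ := (pv_prefix_pair_iff '\\' ']' c rest).mp h1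
      cases rest with
      | nil => simp at hh
      | cons d rest' =>
        simp at hh; subst hh
        rw [pvScan, if_pos ⟨rfl, rfl⟩]
        simp
    | succ g' =>
      have h0 : ¬ (c = '\\' ∧ rest.head? = some ']') := fun hc =>
        h2 0 (by omega) (by simpa using (pv_prefix_pair_iff '\\' ']' c rest).mpr hc)
      rw [pvScan, if_neg h0]
      have := ih g' (acc ++ [c]) (by simpa using h1)
        (fun i hi => by simpa using h2 (i + 1) (by omega))
      rw [this]
      simp [List.drop_succ_cons, List.take_succ_cons]

lemma pvFindLoop_eq (text : String) (fuel : Nat) (blocks : List String) (start : Nat)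
    (hs : start ≤ text.toList.length) (hf : text.toList.length + 1 ≤ fuel + start) :
    pvFindLoop text fuel blocks (start : Int)
      = blocks ++ pvScan (text.toList.drop start) none := by
  induction fuel generalizing blocks start with
  | zero => exfalso; omega
  | succ fuel ih =>
    have hlen : text.toList.length = text.length := by simp
    have hob : ("\\[" : String).toList = ['\\', '['] := by decide
    have hcb : ("\\]" : String).toList = ['\\', ']'] := by decide
    rw [pvFindLoop]
    simp only [PySem.Str.findFrom_eq, hob, hcb,
      PySem.Chars.findFrom_natCast text.toList ['\\', '['] start hs]
    by_cases hf1 : PySem.Chars.find (text.toList.drop start) ['\\', '['] = -1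
    · rw [if_pos hf1, if_pos rfl]
      rw [pvScan_none_nomatch _ (pv_no_infix_no_drop _ _
        ((PySem.Chars.find_eq_neg_one_iff _ _).mp hf1))]
      simp
    · rw [if_neg hf1]
      set f := PySem.Chars.find (text.toList.drop start) ['\\', '['] with hfdef
      have hge : 0 ≤ f := by
        have := PySem.Chars.neg_one_le_find (text.toList.drop start) ['\\', '[']
        omega
      obtain ⟨hpre, hmin⟩ := PySem.Chars.find_spec (s := text.toList.drop start)
        (sub := ['\\', '[']) hge
      rw [if_neg (by omega)]
      have hk2 : start + f.toNat + 2 ≤ text.toList.length := by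
        have := hpre.length_le
        simp [List.length_drop] at this
        omega
      have hcast : (start : Int) + f + 2 = ((start + f.toNat + 2 : Nat) : Int) := by
        push_cast; omega
      rw [hcast, PySem.Chars.findFrom_natCast text.toList ['\\', ']'] _ hk2]
      rw [List.drop_drop] at hpre
      by_cases hf2 : PySem.Chars.find (text.toList.drop (start + f.toNat + 2)) ['\\', ']'] = -1
      · rw [if_pos hf2, if_pos rfl]
        rw [pvScan_none_open (text.toList.drop start) f.toNat (by rw [List.drop_drop]; exact hpre) hmin]
        rw [List.drop_drop]
        have hA : start + (f.toNat + 2) = start + f.toNat + 2 := by omega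
        rw [hA]
        rw [pvScan_some_noclose _ _ (pv_no_infix_no_drop _ _
          ((PySem.Chars.find_eq_neg_one_iff _ _).mp hf2))]
        simp
      · rw [if_neg hf2]
        set g := PySem.Chars.find (text.toList.drop (start + f.toNat + 2)) ['\\', ']'] with hgdef
        have hge2 : 0 ≤ g := by
          have := PySem.Chars.neg_one_le_find (text.toList.drop (start + f.toNat + 2)) ['\\', ']']
          omega
        obtain ⟨hpre2, hmin2⟩ := PySem.Chars.find_spec
          (s := text.toList.drop (start + f.toNat + 2)) (sub := ['\\', ']']) hge2
        rw [if_neg (by omega)]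
        have hk3 : start + f.toNat + 2 + g.toNat + 2 ≤ text.toList.length := by
          have := hpre2.length_le
          simp [List.length_drop] at this
          omega
        -- the appended block equals the scanner's accumulated block
        have hslice : PySem.Str.slice text (some ((start + f.toNat + 2 : Nat) : Int))
            (some (((start + f.toNat + 2 : Nat) : Int) + g))
            = String.ofList ((text.toList.drop (start + f.toNat + 2)).take g.toNat) := by
          have hl : (PySem.Str.slice text (some ((start + f.toNat + 2 : Nat) : Int))
              (some (((start + f.toNat + 2 : Nat) : Int) + g))).toList
              = (text.toList.drop (start + f.toNat + 2)).take g.toNat := by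
            rw [PySem.Str.toList_slice, PySem.Chars.slice_eq_listSlice]
            have : ((start + f.toNat + 2 : Nat) : Int) + g
                = ((start + f.toNat + 2 : Nat) : Int) + (g.toNat : Int) := by omega
            rw [this, PySem.List.slice_natCast_add]
          calc PySem.Str.slice text _ _
              = String.ofList (PySem.Str.slice text (some ((start + f.toNat + 2 : Nat) : Int))
                  (some (((start + f.toNat + 2 : Nat) : Int) + g))).toList := by
                rw [String.ofList_toList]
            _ = String.ofList ((text.toList.drop (start + f.toNat + 2)).take g.toNat) := by
                rw [hl]
        have hcast2 : ((start + f.toNat + 2 : Nat) : Int) + g + 2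
            = ((start + f.toNat + 2 + g.toNat + 2 : Nat) : Int) := by push_cast; omega
        rw [hslice, hcast2, ih _ _ (by omega) (by omega)]
        rw [pvScan_none_open (text.toList.drop start) f.toNat (by rw [List.drop_drop]; exact hpre) hmin]
        rw [List.drop_drop]
        have heq : start + (f.toNat + 2) = start + f.toNat + 2 := by omega
        rw [heq]
        rw [pvScan_some_close _ g.toNat [] hpre2 hmin2]
        rw [List.drop_drop]
        have heq2 : start + f.toNat + 2 + (g.toNat + 2) = start + f.toNat + 2 + g.toNat + 2 := by omega
        rw [heq2]
        simp

-- ===== VERDICT (by name: the statement is the Claim_ definition above) =====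
theorem extract_display_math_blocks_py_spec : Claim_equal_extract_display_math_blocks_py := by
  intro text _
  show extract_display_math_blocks_py text = extract_display_math_blocks_py_alt text
  rw [extract_display_math_blocks_py, extract_display_math_blocks_py_alt]
  have := pvFindLoop_eq text (text.toList.length + 1) [] 0 (by omega) (by omega)
  simpa using this
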